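-- pv_equiv track=rewrite | github.com/kristiangyene/IN1000 | 2016/oppg8.py | besteHus
-- ===== SOURCE A (Python) =====
-- def besteHus(t):
--     antallFemmere = 0
--     antallSeksere = 0
--     for tall in t:
--         if tall == 5:
--             antallFemmere += 1
--         elif tall == 6:
--             antallSeksere += 1
--     if antallFemmere == 2 and antallSeksere == 3:
--         return True
--     return False
-- ===== SOURCE B (Python) =====
-- def besteHus(t):
--     return sorted(x for x in t if x in (5, 6)) == [5, 5, 6, 6, 6]
-- ===== Notes on version B (the rewrite author's own statement) =====
-- stated objective: alternative
-- what changed: Instead of maintaining two counters with per-element elif branching and comparing them to 2 and 3, B filters out the relevant dice values and compares the sorted filtered list against the literal multiset [5, 5, 6, 6, 6].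
import Mathlib
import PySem

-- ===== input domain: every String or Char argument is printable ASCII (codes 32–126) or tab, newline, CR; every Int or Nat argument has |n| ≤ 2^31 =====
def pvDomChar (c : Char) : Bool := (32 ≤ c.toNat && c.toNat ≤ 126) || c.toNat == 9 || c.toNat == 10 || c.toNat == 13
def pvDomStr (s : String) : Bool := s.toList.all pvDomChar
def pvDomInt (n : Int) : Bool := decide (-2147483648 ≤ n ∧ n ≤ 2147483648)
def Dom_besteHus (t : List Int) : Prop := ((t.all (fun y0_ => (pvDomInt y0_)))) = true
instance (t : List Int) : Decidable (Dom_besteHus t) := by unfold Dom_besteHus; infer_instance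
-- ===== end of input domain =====

-- B replaces A's two counters with elif branching by filtering the 5s and 6s and
-- comparing the sorted filtered list to the literal [5, 5, 6, 6, 6]; objective: alternative.

-- ===== PORT A =====
def besteHusLoop (rest : List Int) (antallFemmere antallSeksere : Int) : Int × Int :=
  match rest with
  | [] => (antallFemmere, antallSeksere)
  | tall :: xs =>
    if tall = 5 then besteHusLoop xs (antallFemmere + 1) antallSeksere
    else if tall = 6 then besteHusLoop xs antallFemmere (antallSeksere + 1)
    else besteHusLoop xs antallFemmere antallSeksere

def besteHus (t : List Int) : Bool :=
  let p := besteHusLoop t 0 0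
  if p.1 = 2 ∧ p.2 = 3 then true else false

-- ===== PORT B =====
def besteHus_alt (t : List Int) : Bool :=
  PySem.List.sorted (t.filter (fun x => x = 5 ∨ x = 6)) (fun x => x) false = [5, 5, 6, 6, 6]

-- ===== PRECONDITION & SPEC =====
def Spec_besteHus (t : List Int) (out : Bool) : Prop := out = besteHus_alt t
instance (t : List Int) (out : Bool) : Decidable (Spec_besteHus t out) := by unfold Spec_besteHus; infer_instance

-- ===== CLAIM (what is proved, stated in full; the proofs are below) =====
def Claim_equal_besteHus : Prop := ∀ (t : List Int), Dom_besteHus t → Spec_besteHus t (besteHus t)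

-- ===== LEMMAS AND PROOFS =====
theorem besteHusLoop_eq (t : List Int) (f s : Int) :
    besteHusLoop t f s = (f + t.count 5, s + t.count 6) := by
  induction t generalizing f s with
  | nil => simp [besteHusLoop]
  | cons x xs ih =>
    by_cases h5 : x = 5
    · simp [besteHusLoop, h5, ih, Prod.ext_iff]; omega
    · by_cases h6 : x = 6
      · simp [besteHusLoop, h6, ih, Prod.ext_iff]; omega
      · simp [besteHusLoop, h5, h6, ih]

theorem filter_perm_iff (t : List Int) :
    (t.filter (fun x => decide (x = 5 ∨ x = 6))).Perm [5, 5, 6, 6, 6] ↔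
      t.count 5 = 2 ∧ t.count 6 = 3 := by
  constructor
  · intro h
    have h5 := h.count_eq 5
    have h6 := h.count_eq 6
    simp [List.count_filter] at h5 h6
    exact ⟨h5, h6⟩
  · rintro ⟨h5, h6⟩
    rw [List.perm_iff_count]
    intro a
    by_cases ha5 : a = 5
    · simp [ha5, List.count_filter, h5]
    · by_cases ha6 : a = 6
      · simp [ha6, List.count_filter, h6]
      · have hz : List.count a (t.filter (fun x => decide (x = 5) || decide (x = 6))) = 0 := by
          rw [List.count_eq_zero]
          intro hmem
          rcases List.mem_filter.1 hmem with ⟨-, hp⟩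
          simp at hp
          rcases hp with h | h <;> [exact ha5 h; exact ha6 h]
        simp [hz, List.count_cons, List.count_nil, Ne.symm ha5, Ne.symm ha6]

theorem sorted_literal_iff (t : List Int) :
    PySem.List.sorted (t.filter (fun x => decide (x = 5 ∨ x = 6))) (fun x => x) false
        = [5, 5, 6, 6, 6] ↔
      (t.filter (fun x => decide (x = 5 ∨ x = 6))).Perm [5, 5, 6, 6, 6] := by
  constructor
  · intro h
    have := PySem.List.sorted_perm (t.filter (fun x => decide (x = 5 ∨ x = 6)))
        (fun x : Int => x) false
    rw [h] at this
    exact this.symm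
  · intro h
    exact PySem.List.sorted_id_eq_of_perm_of_pairwise _ _ h.symm (by decide)

-- ===== VERDICT (by name: the statement is the Claim_ definition above) =====
theorem besteHus_spec : Claim_equal_besteHus := by
  intro t _
  unfold Spec_besteHus besteHus besteHus_alt
  simp only [besteHusLoop_eq, sorted_literal_iff, filter_perm_iff]
  by_cases h5 : t.count 5 = 2 <;> by_cases h6 : t.count 6 = 3 <;>
    simp [h5, h6] <;> omega
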